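-- pv_equiv track=rewrite | github.com/Enliven26/IF4092-Tugas-Akhir | src/program/core/parsers/language/java.py | __get_declaration_text
-- ===== SOURCE A (Python) =====
-- from typing import Optional
--
-- def __get_declaration_text(
--
--         code_lines: list[str],
--         start_line: int,
--         end_line: int,
--         last_endline_index: Optional[int] = None) -> tuple[str, int]:
--
--     startline_index = start_line - 1
--     endline_index = end_line - 1
--
--     # 1. check for and fetch annotations
--     if last_endline_index is not None:
--         for line in code_lines[(last_endline_index + 1):(startline_index)]:
--             if "@" in line:
--                 startline_index = startline_index - 1
--     declaration_text = "<ST>".join(code_lines[startline_index:endline_index])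
--     declaration_text = declaration_text[:declaration_text.rfind("}") + 1]
--
--     # 2. remove trailing rbrace for last methods & any external content/comments
--     if not abs(declaration_text.count("}") - declaration_text.count("{")) == 0:
--         # imbalanced braces
--         brace_diff = abs(declaration_text.count("}") - declaration_text.count("{"))
--
--         for _ in range(brace_diff):
--             declaration_text = declaration_text[:declaration_text.rfind("}")]
--             declaration_text = declaration_text[:declaration_text.rfind("}") + 1]
--
--     meth_lines = declaration_text.split("<ST>")
--     declaration_text = "".join(meth_lines)
--     last_endline_index = startline_index + (len(meth_lines) - 1)
--
--     return declaration_text, (startline_index + 1), (last_endline_index + 1), last_endline_index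
-- ===== SOURCE B (Python) =====
-- # B: char-level reverse scan — the whole trimming (initial rfind cut and the
-- # brace_diff rfind loop) becomes reverse the text once and drop to the n-th '}'.
-- def __get_declaration_text(
--         code_lines,
--         start_line,
--         end_line,
--         last_endline_index=None):
--
--     startline_index = start_line - 1
--     if last_endline_index is not None:
--         startline_index -= sum(1 for line in code_lines[last_endline_index + 1:startline_index]
--                                if "@" in line)
--
--     rev = list(reversed("<ST>".join(code_lines[startline_index:end_line - 1])))
--     rev = _drop_to_rbrace(rev, 1)
--     diff = abs(sum(1 for c in rev if c == '}') - sum(1 for c in rev if c == '{'))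
--     if diff != 0:
--         rev = _drop_to_rbrace(rev, diff + 1)
--
--     meth_lines = ''.join(reversed(rev)).split("<ST>")
--     last_endline_index = startline_index + len(meth_lines) - 1
--     return ("".join(meth_lines), startline_index + 1,
--             last_endline_index + 1, last_endline_index)
--
--
-- def _drop_to_rbrace(rev, n):
--     # suffix of the reversed text starting at its n-th '}' ([] if it has fewer than n)
--     for i, c in enumerate(rev):
--         if c == '}':
--             if n == 1:
--                 return rev[i:]
--             n -= 1
--     return []
-- ===== Notes on version B (the rewrite author's own statement) =====
-- stated objective: alternative
-- what changed: A's initial rfind cut and its brace_diff-pass rfind-and-slice trimming loop are replaced by reversing the joined text once and dropping to the n-th '}' in a single forward scan of the reversed characters (helper _drop_to_rbrace); brace counts and the annotation count become comprehension sums over characters/lines.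
import Mathlib
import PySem

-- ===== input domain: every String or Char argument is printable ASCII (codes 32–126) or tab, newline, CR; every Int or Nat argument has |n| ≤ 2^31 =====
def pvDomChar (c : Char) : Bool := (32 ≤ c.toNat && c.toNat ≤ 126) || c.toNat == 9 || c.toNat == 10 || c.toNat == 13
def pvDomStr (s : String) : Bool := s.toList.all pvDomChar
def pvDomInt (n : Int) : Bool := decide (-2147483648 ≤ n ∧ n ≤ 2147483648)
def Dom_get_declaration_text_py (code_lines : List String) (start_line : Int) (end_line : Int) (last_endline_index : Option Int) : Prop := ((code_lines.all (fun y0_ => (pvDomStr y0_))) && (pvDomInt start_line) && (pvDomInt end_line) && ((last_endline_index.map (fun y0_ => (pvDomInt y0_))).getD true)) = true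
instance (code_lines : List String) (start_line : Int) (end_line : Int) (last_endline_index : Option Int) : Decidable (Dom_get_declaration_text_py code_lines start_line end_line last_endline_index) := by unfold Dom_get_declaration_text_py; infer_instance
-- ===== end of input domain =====

-- B replaces A's initial rfind cut and its brace_diff rfind-and-slice trimming loop by one
-- reversal of the text and a scan of the reversed characters dropping to the n-th '}'
-- (objective: alternative).

-- ===== PORT A =====
def get_declaration_text_py (code_lines : List String) (start_line : Int) (end_line : Int) (last_endline_index : Option Int) : String × Int × Int × Int :=
  let startline_index := start_line - 1
  let endline_index := end_line - 1
  let startline_index :=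
    match last_endline_index with
    | some lei =>
        (PySem.List.slice code_lines (some (lei + 1)) (some startline_index)).foldl
          (fun si line => if PySem.Str.isIn "@" line then si - 1 else si) startline_index
    | none => startline_index
  let t0 := PySem.Str.join "<ST>" (PySem.List.slice code_lines (some startline_index) (some endline_index))
  let t1 := PySem.Str.slice t0 none (some (PySem.Str.rfind t0 "}" + 1))
  let t2 :=
    if ((PySem.Str.count t1 "}" : Int) - (PySem.Str.count t1 "{" : Int)).natAbs ≠ 0 then
      let brace_diff := ((PySem.Str.count t1 "}" : Int) - (PySem.Str.count t1 "{" : Int)).natAbs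
      (List.range brace_diff).foldl
        (fun t _ =>
          let ta := PySem.Str.slice t none (some (PySem.Str.rfind t "}"))
          PySem.Str.slice ta none (some (PySem.Str.rfind ta "}" + 1))) t1
    else t1
  let meth_lines := (PySem.Str.split? t2 "<ST>").getD []
  let t3 := PySem.Str.join "" meth_lines
  let lei' := startline_index + ((meth_lines.length : Int) - 1)
  (t3, startline_index + 1, lei' + 1, lei')

-- ===== PORT B =====
-- port of Source B's _drop_to_rbrace: scan of the reversed text, returning the suffix that
-- starts at its n-th '}' ([] if there are fewer than n)
def dropToRbrace : List Char → Int → List Char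
  | [], _ => []
  | c :: rest, n =>
    if c = '}' then (if n = 1 then c :: rest else dropToRbrace rest (n - 1))
    else dropToRbrace rest n

def get_declaration_text_py_alt (code_lines : List String) (start_line : Int) (end_line : Int) (last_endline_index : Option Int) : String × Int × Int × Int :=
  let startline_index :=
    match last_endline_index with
    | some lei =>
        (start_line - 1) -
          ((PySem.List.slice code_lines (some (lei + 1)) (some (start_line - 1))).countP
            (fun line => PySem.Str.isIn "@" line) : Int)
    | none => start_line - 1
  let rev0 := dropToRbrace (PySem.Str.join "<ST>" (PySem.List.slice code_lines (some startline_index) (some (end_line - 1)))).toList.reverse 1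
  let diff := ((rev0.countP (fun c => c == '}') : Int) - (rev0.countP (fun c => c == '{') : Int)).natAbs
  let rev := if diff ≠ 0 then dropToRbrace rev0 ((diff : Int) + 1) else rev0
  let meth_lines := (PySem.Str.split? (String.ofList rev.reverse) "<ST>").getD []
  let lei' := startline_index + ((meth_lines.length : Int) - 1)
  (PySem.Str.join "" meth_lines, startline_index + 1, lei' + 1, lei')

-- ===== PRECONDITION & SPEC =====
def Spec_get_declaration_text_py (code_lines : List String) (start_line : Int) (end_line : Int) (last_endline_index : Option Int) (out : String × Int × Int × Int) : Prop := out = get_declaration_text_py_alt code_lines start_line end_line last_endline_index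
instance (code_lines : List String) (start_line : Int) (end_line : Int) (last_endline_index : Option Int) (out : String × Int × Int × Int) : Decidable (Spec_get_declaration_text_py code_lines start_line end_line last_endline_index out) := by unfold Spec_get_declaration_text_py; infer_instance

-- ===== CLAIM (what is proved, stated in full; the proofs are below) =====
def Claim_equal_get_declaration_text_py : Prop := ∀ (code_lines : List String) (start_line : Int) (end_line : Int) (last_endline_index : Option Int), Dom_get_declaration_text_py code_lines start_line end_line last_endline_index → Spec_get_declaration_text_py code_lines start_line end_line last_endline_index (get_declaration_text_py code_lines start_line end_line last_endline_index)

-- ===== LEMMAS AND PROOFS =====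

-- the annotation-scan fold is subtraction of a countP
theorem pv_ann_foldl (lines : List String) (si : Int) :
    lines.foldl (fun si line => if PySem.Str.isIn "@" line then si - 1 else si) si
      = si - (lines.countP (fun line => PySem.Str.isIn "@" line) : Int) := by
  induction lines generalizing si with
  | nil => simp
  | cons l ls ih =>
    rw [List.foldl_cons, ih, List.countP_cons]
    split_ifs <;> push_cast <;> omega

-- invariant: the reversed text is empty or starts with '}'
def pvInv (r : List Char) : Prop := r = [] ∨ r.head? = some '}'

-- ----- facts about rfind with a single '}' -----

theorem pv_isPrefixOf_append_last (l : List Char) (c : Char) (h : l ≠ []) :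
    List.isPrefixOf ['}'] (l ++ [c]) = List.isPrefixOf ['}'] l := by
  cases l with
  | nil => exact absurd rfl h
  | cons a t => simp [List.isPrefixOf]

theorem pv_go_le (n : Nat) (cs : List Char) : PySem.Chars.rfind.go cs ['}'] n ≤ (n : Int) := by
  induction n with
  | zero => simp [PySem.Chars.rfind.go]; split <;> omega
  | succ j ih =>
    simp only [PySem.Chars.rfind.go]
    split
    · omega
    · omega

theorem pv_rfind_lt (cs : List Char) : PySem.Chars.rfind cs ['}'] < (cs.length : Int) := by
  cases hl : cs.length with
  | zero =>
    have : cs = [] := List.length_eq_zero_iff.mp hl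
    subst this; simp [PySem.Chars.rfind, PySem.Chars.rfind.go, List.isPrefixOf]
  | succ j =>
    simp only [PySem.Chars.rfind, hl, PySem.Chars.rfind.go]
    have hd : cs.drop (j + 1) = [] := by
      apply List.drop_eq_nil_of_le; omega
    rw [hd]
    simp [List.isPrefixOf]
    have := pv_go_le j cs
    omega

theorem pv_go_ge (n : Nat) (cs : List Char) : -1 ≤ PySem.Chars.rfind.go cs ['}'] n := by
  induction n with
  | zero => simp [PySem.Chars.rfind.go]; split <;> omega
  | succ j ih =>
    simp only [PySem.Chars.rfind.go]
    split
    · omega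
    · exact ih

theorem pv_rfind_ge (cs : List Char) : -1 ≤ PySem.Chars.rfind cs ['}'] :=
  pv_go_ge cs.length cs

theorem pv_go_freeze (u : List Char) (c : Char) (m : Nat) (hm : m < u.length) :
    PySem.Chars.rfind.go (u ++ [c]) ['}'] m = PySem.Chars.rfind.go u ['}'] m := by
  induction m with
  | zero =>
    have hu : u ≠ [] := by intro h; subst h; simp at hm
    simp [PySem.Chars.rfind.go, pv_isPrefixOf_append_last u c hu]
  | succ j ih =>
    have hne : u.drop (j + 1) ≠ [] := by
      simp [List.drop_eq_nil_iff]; omega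
    simp only [PySem.Chars.rfind.go]
    rw [List.drop_append_of_le_length (by omega), pv_isPrefixOf_append_last _ c hne,
        ih (by omega)]

theorem pv_rfind_append_rbrace (u : List Char) :
    PySem.Chars.rfind (u ++ ['}']) ['}'] = (u.length : Int) := by
  simp only [PySem.Chars.rfind, List.length_append, List.length_singleton]
  simp only [PySem.Chars.rfind.go]
  have hd1 : (u ++ ['}']).drop (u.length + 1) = [] := by
    apply List.drop_eq_nil_of_le; simp
  rw [hd1]
  simp only [List.isPrefixOf, Bool.false_eq_true, if_false]
  cases hu : u.length with
  | zero =>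
    have : u = [] := List.length_eq_zero_iff.mp hu
    subst this; simp [PySem.Chars.rfind.go, List.isPrefixOf]
  | succ m =>
    simp only [PySem.Chars.rfind.go]
    have : (u ++ ['}']).drop (m + 1) = ['}'] := by
      rw [← hu, List.drop_left]
    rw [this]
    simp [List.isPrefixOf]

theorem pv_rfind_append_other (u : List Char) (c : Char) (hc : c ≠ '}') :
    PySem.Chars.rfind (u ++ [c]) ['}'] = PySem.Chars.rfind u ['}'] := by
  simp only [PySem.Chars.rfind, List.length_append, List.length_singleton]
  simp only [PySem.Chars.rfind.go]
  have hd1 : (u ++ [c]).drop (u.length + 1) = [] := by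
    apply List.drop_eq_nil_of_le; simp
  rw [hd1]
  simp only [List.isPrefixOf, Bool.false_eq_true, if_false]
  cases hu : u.length with
  | zero =>
    have : u = [] := List.length_eq_zero_iff.mp hu
    subst this
    simp [PySem.Chars.rfind.go, List.isPrefixOf, Ne.symm hc]
  | succ m =>
    simp only [PySem.Chars.rfind.go]
    have hdc : (u ++ [c]).drop (m + 1) = [c] := by
      rw [← hu, List.drop_left]
    have hdu : u.drop (m + 1) = [] := by
      apply List.drop_eq_nil_of_le; omega
    rw [hdc, hdu]
    simp [List.isPrefixOf, Ne.symm hc]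
    exact pv_go_freeze u c m (by omega)

-- trim-to-last-'}' equals dropWhile on the reverse (list level)
theorem pv_trim_list (cs : List Char) :
    (PySem.List.slice cs none (some (PySem.Chars.rfind cs ['}'] + 1))).reverse
      = cs.reverse.dropWhile (fun c => c != '}') := by
  induction cs using List.reverseRecOn with
  | nil => simp [PySem.List.slice]
  | append_singleton u c ih =>
    by_cases hc : c = '}'
    · subst hc
      rw [pv_rfind_append_rbrace]
      have : PySem.List.slice (u ++ ['}']) none (some ((u.length : Int) + 1))
          = u ++ ['}'] := by
        have := PySem.List.slice_to_natCast (u ++ ['}']) (u.length + 1)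
        push_cast at this ⊢
        rw [this]
        simp [List.take_of_length_le]
      rw [this]
      simp
    · rw [pv_rfind_append_other u c hc]
      have hge := pv_rfind_ge u
      have hlt := pv_rfind_lt u
      set k := PySem.Chars.rfind u ['}'] with hk
      have h0 : 0 ≤ k + 1 := by omega
      have hs1 : PySem.List.slice (u ++ [c]) none (some (k + 1)) = (u ++ [c]).take (k+1).toNat :=
        PySem.List.slice_to _ h0
      have hs2 : PySem.List.slice u none (some (k + 1)) = u.take (k+1).toNat :=
        PySem.List.slice_to _ h0
      rw [hs1]
      rw [List.take_append_of_le_length (by omega)]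
      rw [← hs2, ih]
      simp [hc]

-- string-level trim lemma
theorem pv_trim_str (t : String) :
    (PySem.Str.slice t none (some (PySem.Str.rfind t "}" + 1))).toList.reverse
      = t.toList.reverse.dropWhile (fun c => c != '}') := by
  have h1 : ("}" : String).toList = ['}'] := by decide
  rw [PySem.Str.rfind_eq, h1]
  rw [show (PySem.Str.slice t none (some (PySem.Chars.rfind t.toList ['}'] + 1))).toList
        = PySem.List.slice t.toList none (some (PySem.Chars.rfind t.toList ['}'] + 1)) from
      PySem.Str.toList_slice t none (some (PySem.Chars.rfind t.toList ['}'] + 1))]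
  exact pv_trim_list t.toList

theorem pv_inv_dropWhile (l : List Char) : pvInv (l.dropWhile (fun c => c != '}')) := by
  induction l with
  | nil => left; rfl
  | cons c rest ih =>
    by_cases hc : c = '}'
    · right; simp [hc]
    · simpa [List.dropWhile_cons, hc] using ih

theorem pv_inv_trim (t : String) :
    pvInv (PySem.Str.slice t none (some (PySem.Str.rfind t "}" + 1))).toList.reverse := by
  rw [pv_trim_str]; exact pv_inv_dropWhile _

-- B's scan to the FIRST '}' is dropWhile
theorem pv_drop1 (l : List Char) :
    dropToRbrace l 1 = l.dropWhile (fun c => c != '}') := by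
  induction l with
  | nil => rfl
  | cons c rest ih =>
    by_cases hc : c = '}'
    · simp [dropToRbrace, hc]
    · simp [dropToRbrace, hc, ih]

theorem pv_drop_dropWhile (need : Int) (l : List Char) :
    dropToRbrace (l.dropWhile (fun c => c != '}')) need = dropToRbrace l need := by
  induction l with
  | nil => rfl
  | cons c rest ih =>
    have e : dropToRbrace (c :: rest) need
        = if c = '}' then (if need = 1 then c :: rest else dropToRbrace rest (need - 1))
          else dropToRbrace rest need := rfl
    by_cases hc : c = '}'
    · simp [hc]
    · rw [List.dropWhile_cons, if_pos (by simp [hc]), ih, e, if_neg hc]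

theorem pv_drop_one (r : List Char) (h : pvInv r) : dropToRbrace r 1 = r := by
  rcases h with h | h
  · subst h; rfl
  · cases r with
    | nil => rfl
    | cons a l =>
      have ha : a = '}' := by simpa using h
      have e : dropToRbrace (a :: l) 1
          = if a = '}' then (if (1:Int) = 1 then a :: l else dropToRbrace l 0)
            else dropToRbrace l 1 := rfl
      rw [e, if_pos ha, if_pos rfl]

theorem pv_drop_succ (d : Nat) (r : List Char) (h : pvInv r) :
    dropToRbrace r.tail ((d : Int) + 1) = dropToRbrace r ((d : Int) + 1 + 1) := by
  rcases h with h | h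
  · subst h; rfl
  · cases r with
    | nil => rfl
    | cons a l =>
      have ha : a = '}' := by simpa using h
      have e : dropToRbrace (a :: l) ((d : Int) + 1 + 1)
          = if a = '}' then (if ((d : Int) + 1 + 1) = 1 then a :: l else dropToRbrace l ((d : Int) + 1 + 1 - 1))
            else dropToRbrace l ((d : Int) + 1 + 1) := rfl
      rw [e, if_pos ha, if_neg (by omega)]
      simp only [List.tail_cons]
      congr 1
      ring

-- one step of A's trimming loop, on the reversed character list
theorem pv_stepA_toList (t : String) (h : pvInv t.toList.reverse) :
    (PySem.Str.slice (PySem.Str.slice t none (some (PySem.Str.rfind t "}")))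
        none (some (PySem.Str.rfind (PySem.Str.slice t none (some (PySem.Str.rfind t "}"))) "}" + 1))).toList.reverse
      = (t.toList.reverse.tail).dropWhile (fun c => c != '}') := by
  rcases h with h | h
  · have ht : t = "" := by
      apply String.toList_inj.mp
      have := congrArg List.reverse h
      simpa using this
    subst ht
    decide
  · obtain ⟨rest, hr⟩ : ∃ rest, t.toList.reverse = '}' :: rest := by
      cases hrev : t.toList.reverse with
      | nil => rw [hrev] at h; simp at h
      | cons a l => rw [hrev] at h; simp at h; exact ⟨l, by rw [h]⟩
    have htl : t.toList = rest.reverse ++ ['}'] := by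
      have := congrArg List.reverse hr
      simpa using this
    have hrfind : PySem.Str.rfind t "}" = (rest.length : Int) := by
      have h1 : ("}" : String).toList = ['}'] := by decide
      rw [PySem.Str.rfind_eq, h1, htl, pv_rfind_append_rbrace]
      simp
    rw [pv_trim_str]
    have hta : (PySem.Str.slice t none (some (PySem.Str.rfind t "}"))).toList = rest.reverse := by
      rw [PySem.Str.toList_slice]
      simp only [PySem.Chars.slice_eq_listSlice]
      rw [hrfind, PySem.List.slice_to_natCast, htl]
      rw [show rest.length = rest.reverse.length by simp]
      exact List.take_left
    rw [hta]
    rw [hr]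
    simp

-- the fold over range with a constant function is iteration
theorem pv_foldl_range_const {α : Type} (g : α → α) (d : Nat) (t : α) :
    (List.range d).foldl (fun t _ => g t) t = g^[d] t := by
  induction d with
  | zero => simp
  | succ n ih => rw [List.range_succ, List.foldl_append, ih, Function.iterate_succ_apply']; rfl

-- iterating A's step d times is dropToRbrace (d+1) on the reverse
theorem pv_iter_eq (d : Nat) (t : String) (h : pvInv t.toList.reverse) :
    ((fun t => PySem.Str.slice (PySem.Str.slice t none (some (PySem.Str.rfind t "}")))
        none (some (PySem.Str.rfind (PySem.Str.slice t none (some (PySem.Str.rfind t "}"))) "}" + 1)))^[d] t).toList.reverse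
      = dropToRbrace t.toList.reverse ((d : Int) + 1) := by
  induction d generalizing t with
  | zero =>
    simp only [Function.iterate_zero, id_eq, Nat.cast_zero, zero_add]
    rw [pv_drop_one _ h]
  | succ n ih =>
    rw [Function.iterate_succ_apply]
    have hstep := pv_stepA_toList t h
    have hinv2 : pvInv (PySem.Str.slice (PySem.Str.slice t none (some (PySem.Str.rfind t "}")))
        none (some (PySem.Str.rfind (PySem.Str.slice t none (some (PySem.Str.rfind t "}"))) "}" + 1))).toList.reverse := by
      rw [hstep]; exact pv_inv_dropWhile _
    have hcast : ((n : Int) + 1 + 1) = (((n + 1 : Nat)) : Int) + 1 := by push_cast; ring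
    rw [ih _ hinv2, hstep, pv_drop_dropWhile, pv_drop_succ n _ h, hcast]

-- A's whole trimming loop equals B's single reverse-scan drop
theorem pv_loop_eq (t : String) (d : Nat) (h : pvInv t.toList.reverse) :
    (List.range d).foldl
        (fun t _ =>
          let ta := PySem.Str.slice t none (some (PySem.Str.rfind t "}"))
          PySem.Str.slice ta none (some (PySem.Str.rfind ta "}" + 1))) t
      = String.ofList (dropToRbrace t.toList.reverse ((d : Int) + 1)).reverse := by
  apply String.toList_inj.mp
  rw [pv_foldl_range_const]
  have hL := pv_iter_eq d t h
  have hLHS := congrArg List.reverse hL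
  simp only [List.reverse_reverse] at hLHS
  rw [hLHS, String.toList_ofList]

-- Python's non-overlapping substring count, for a single-character needle, is countP
theorem pv_count_go_single (c : Char) (fuel : Nat) (l : List Char) (acc : Nat)
    (h : l.length ≤ fuel) :
    PySem.Chars.count.go [c] fuel l acc = acc + l.countP (fun x => x == c) := by
  induction fuel generalizing l acc with
  | zero =>
    have : l = [] := List.length_eq_zero_iff.mp (Nat.le_zero.mp h)
    subst this
    simp [PySem.Chars.count.go]
  | succ m ih =>
    cases l with
    | nil => simp [PySem.Chars.count.go]
    | cons a t =>
      have e : PySem.Chars.count.go [c] (m + 1) (a :: t) acc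
          = if List.isPrefixOf [c] (a :: t) then
              PySem.Chars.count.go [c] m (List.drop 1 (a :: t)) (acc + 1)
            else PySem.Chars.count.go [c] m t acc := rfl
      have hp : List.isPrefixOf [c] (a :: t) = (c == a) := by simp [List.isPrefixOf]
      rw [e, hp]
      by_cases hca : c = a
      · rw [if_pos (by simp [hca]), List.drop_one, List.tail_cons,
            ih t (acc + 1) (by simpa using h), List.countP_cons,
            if_pos (by simp [hca])]
        omega
      · rw [if_neg (by simp [hca]),
            ih t acc (by simpa using h), List.countP_cons,
            if_neg (by simp [Ne.symm hca])]
        omega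

theorem pv_count_single (t : String) (sub : String) (c : Char) (h : sub.toList = [c]) :
    PySem.Str.count t sub = t.toList.countP (fun x => x == c) := by
  rw [PySem.Str.count, h, PySem.Chars.count]
  rw [if_neg (by simp)]
  rw [pv_count_go_single c t.toList.length t.toList 0 le_rfl]
  omega


-- the whole trimmed text: A's slice + conditional loop equals B's reverse-scan drops
theorem pv_t2_eq (t0 : String) :
    (if ((PySem.Str.count (PySem.Str.slice t0 none (some (PySem.Str.rfind t0 "}" + 1))) "}" : Int)
          - (PySem.Str.count (PySem.Str.slice t0 none (some (PySem.Str.rfind t0 "}" + 1))) "{" : Int)).natAbs ≠ 0 then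
       (List.range (((PySem.Str.count (PySem.Str.slice t0 none (some (PySem.Str.rfind t0 "}" + 1))) "}" : Int)
          - (PySem.Str.count (PySem.Str.slice t0 none (some (PySem.Str.rfind t0 "}" + 1))) "{" : Int)).natAbs)).foldl
         (fun t _ =>
           let ta := PySem.Str.slice t none (some (PySem.Str.rfind t "}"))
           PySem.Str.slice ta none (some (PySem.Str.rfind ta "}" + 1)))
         (PySem.Str.slice t0 none (some (PySem.Str.rfind t0 "}" + 1)))
     else PySem.Str.slice t0 none (some (PySem.Str.rfind t0 "}" + 1)))
  = String.ofList
      (if (((dropToRbrace t0.toList.reverse 1).countP (fun c => c == '}') : Int)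
            - ((dropToRbrace t0.toList.reverse 1).countP (fun c => c == '{') : Int)).natAbs ≠ 0 then
         dropToRbrace (dropToRbrace t0.toList.reverse 1)
           (((((dropToRbrace t0.toList.reverse 1).countP (fun c => c == '}') : Int)
            - ((dropToRbrace t0.toList.reverse 1).countP (fun c => c == '{') : Int)).natAbs : Int) + 1)
       else dropToRbrace t0.toList.reverse 1).reverse := by
  have hrev0 : dropToRbrace t0.toList.reverse 1
      = (PySem.Str.slice t0 none (some (PySem.Str.rfind t0 "}" + 1))).toList.reverse := by
    rw [pv_drop1, ← pv_trim_str]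
  rw [hrev0]
  set t1 := PySem.Str.slice t0 none (some (PySem.Str.rfind t0 "}" + 1)) with ht1
  have hc1 : (t1.toList.reverse.countP (fun c => c == '}') : Int) = (PySem.Str.count t1 "}" : Int) := by
    rw [List.countP_reverse, pv_count_single t1 "}" '}' (by decide)]
  have hc2 : (t1.toList.reverse.countP (fun c => c == '{') : Int) = (PySem.Str.count t1 "{" : Int) := by
    rw [List.countP_reverse, pv_count_single t1 "{" '{' (by decide)]
  rw [hc1, hc2]
  by_cases hd : ((PySem.Str.count t1 "}" : Int) - (PySem.Str.count t1 "{" : Int)).natAbs = 0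
  · rw [if_neg (by omega), if_neg (by omega)]
    apply String.toList_inj.mp
    rw [String.toList_ofList, List.reverse_reverse]
  · rw [if_pos hd, if_pos hd]
    have hinv : pvInv t1.toList.reverse := by rw [ht1]; exact pv_inv_trim t0
    exact pv_loop_eq t1 _ hinv

-- ===== VERDICT (by name: the statement is the Claim_ definition above) =====
theorem get_declaration_text_py_spec : Claim_equal_get_declaration_text_py := by
  intro code_lines start_line end_line last_endline_index _
  unfold Spec_get_declaration_text_py get_declaration_text_py get_declaration_text_py_alt
  cases last_endline_index with
  | none =>
    simp only []
    rw [pv_t2_eq]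
  | some lei =>
    simp only [pv_ann_foldl]
    rw [pv_t2_eq]
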